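-- pv_equiv track=rewrite | github.com/muitiiifruckt/python | Laba_1.py | init_basis
-- ===== SOURCE A (Python) =====
-- def init_basis(A):
--     A_сol = [[A[i][j] for i in range(len(A))] for j in range(len(A[0]))]
--     len_A = len(A)
--     dop_bas = []
--     ind_bas = []
--     for i in range(len_A):
--         basis = []
--         for j in range(len_A): #генири базис
--             basis.append(1 if i == j else 0)
--         if not(basis in A_сol): # провер если такой базис в матрице A
--             dop_bas.append(basis)
--             ind_bas.append(i)
--     return dop_bas
-- ===== SOURCE B (Python) =====
-- def init_basis(A):
--     n = len(A)
--     m = len(A[0])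
--     present = set()
--     for j in range(m):
--         col = [A[i][j] for i in range(n)]
--         if col.count(1) == 1 and col.count(0) == n - 1:
--             present.add(col.index(1))
--     return [[1 if i == k else 0 for k in range(n)] for i in range(n) if i not in present]
-- ===== Notes on version B (the rewrite author's own statement) =====
-- stated objective: alternative
-- what changed: B drops A's transpose-then-membership search (building all n candidate basis vectors and scanning the column list for each) and instead makes one pass over the columns recording in a set which standard-basis positions occur, then emits the missing identity vectors.
import Mathlib
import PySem

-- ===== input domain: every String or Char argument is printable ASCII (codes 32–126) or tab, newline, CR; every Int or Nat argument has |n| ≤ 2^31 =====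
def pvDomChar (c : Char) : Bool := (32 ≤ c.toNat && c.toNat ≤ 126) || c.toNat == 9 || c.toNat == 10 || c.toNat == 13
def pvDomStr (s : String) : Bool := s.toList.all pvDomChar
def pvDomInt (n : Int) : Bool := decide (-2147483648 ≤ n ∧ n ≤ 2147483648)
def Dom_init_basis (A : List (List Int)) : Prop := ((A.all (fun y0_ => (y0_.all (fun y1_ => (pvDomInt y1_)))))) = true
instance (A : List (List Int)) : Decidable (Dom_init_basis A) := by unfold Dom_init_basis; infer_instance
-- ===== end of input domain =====

-- B replaces A's transpose-then-membership search by a single pass over the columns that records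
-- which standard-basis positions occur (a set), then emits the missing basis vectors; return values agree.

-- ===== PORT A =====
def init_basis (A : List (List Int)) : List (List Int) :=
  let Acol : List (List Int) :=
    (PySem.List.pyRange 0 ((A.headD []).length : Int) 1).map (fun j =>
      (PySem.List.pyRange 0 (A.length : Int) 1).map (fun i =>
        PySem.List.pyGetD (PySem.List.pyGetD A i []) j 0))
  let lenA : Int := (A.length : Int)
  let st := (PySem.List.pyRange 0 lenA 1).foldl
    (fun (st : List (List Int) × List Int) i =>
      let basis : List Int := (PySem.List.pyRange 0 lenA 1).foldl
        (fun b j => b ++ [if i == j then (1 : Int) else 0]) []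
      if ¬ (basis ∈ Acol) then (st.1 ++ [basis], st.2 ++ [i]) else st)
    ([], [])
  st.1

-- ===== PORT B =====
def init_basis_alt (A : List (List Int)) : List (List Int) :=
  let n : Int := (A.length : Int)
  let m : Int := ((A.headD []).length : Int)
  let present : PySem.Set Int :=
    (PySem.List.pyRange 0 m 1).foldl
      (fun s j =>
        let col : List Int := (PySem.List.pyRange 0 n 1).map (fun i =>
          PySem.List.pyGetD (PySem.List.pyGetD A i []) j 0)
        if (PySem.List.count col 1 : Int) = 1 ∧ (PySem.List.count col 0 : Int) = n - 1 then
          PySem.Set.add s (((PySem.List.index? col 1).getD 0 : Nat) : Int)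
        else s)
      PySem.Set.empty
  ((PySem.List.pyRange 0 n 1).filter
      (fun i => !(PySem.Set.contains present i))).map
    (fun i => (PySem.List.pyRange 0 n 1).map (fun k => if i == k then (1 : Int) else 0))

-- ===== PRECONDITION & SPEC =====
-- Pre_ excludes exactly the inputs where Python A raises: the empty matrix (len(A[0]) → IndexError)
-- and ragged matrices with a row shorter than the first row (A[i][j] → IndexError).
def Pre_init_basis (A : List (List Int)) : Prop :=
  A ≠ [] ∧ ∀ row ∈ A, (A.headD []).length ≤ row.length
instance (A : List (List Int)) : Decidable (Pre_init_basis A) := by unfold Pre_init_basis; infer_instance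

def pvWitness_init_basis : List (List Int) := [[1, 0], [2, 3]]

def Spec_init_basis (A : List (List Int)) (out : List (List Int)) : Prop := out = init_basis_alt A
instance (A : List (List Int)) (out : List (List Int)) : Decidable (Spec_init_basis A out) := by unfold Spec_init_basis; infer_instance

-- ===== CLAIM (what is proved, stated in full; the proofs are below) =====
def Claim_equal_init_basis : Prop := ∀ (A : List (List Int)), Dom_init_basis A → Pre_init_basis A → Spec_init_basis A (init_basis A)

-- ===== LEMMAS AND PROOFS =====

-- A's accumulation loop over (dop_bas, ind_bas): the returned first component is a filtered map.
lemma foldl_pair_append_ite {α β : Type} (P : β → Prop) [DecidablePred P]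
    (f : α → β) (l : List α) (d : List β) (e : List α) :
    (l.foldl (fun (st : List β × List α) i =>
        if ¬ P (f i) then (st.1 ++ [f i], st.2 ++ [i]) else st) (d, e)).1
      = d ++ (l.filter (fun i => decide (¬ P (f i)))).map f := by
  induction l generalizing d e with
  | nil => simp
  | cons x xs ih =>
    by_cases h : P (f x)
    · rw [List.foldl_cons, if_neg (fun hc => hc h), List.filter_cons, ih]
      simp [h]
    · rw [List.foldl_cons, if_pos h, List.filter_cons, ih]
      simp [h]

-- membership in B's `present`-building loop
lemma mem_foldl_add_ite {α β : Type} [BEq β] [LawfulBEq β] (P : α → Prop) [DecidablePred P]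
    (g : α → β) (l : List α) (s : PySem.Set β) (y : β) :
    (y ∈ l.foldl (fun s x => if P x then PySem.Set.add s (g x) else s) s)
      ↔ y ∈ s ∨ ∃ x ∈ l, P x ∧ y = g x := by
  induction l generalizing s with
  | nil => simp
  | cons x xs ih =>
    simp only [List.foldl_cons]
    by_cases h : P x
    · simp only [if_pos h, ih, PySem.Set.mem_add, List.mem_cons]
      constructor
      · rintro (⟨hy | hy⟩ | ⟨z, hz, hP, hy⟩)
        · exact Or.inl hy
        · exact Or.inr ⟨x, Or.inl rfl, h, hy⟩
        · exact Or.inr ⟨z, Or.inr hz, hP, hy⟩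
      · rintro (hy | ⟨z, (rfl | hz), hP, hy⟩)
        · exact Or.inl (Or.inl hy)
        · exact Or.inl (Or.inr hy)
        · exact Or.inr ⟨z, hz, hP, hy⟩
    · simp only [if_neg h, ih, List.mem_cons]
      constructor
      · rintro (hy | ⟨z, hz, hP, hy⟩)
        · exact Or.inl hy
        · exact Or.inr ⟨z, Or.inr hz, hP, hy⟩
      · rintro (hy | ⟨z, (rfl | hz), hP, hy⟩)
        · exact Or.inl hy
        · exact absurd hP h
        · exact Or.inr ⟨z, hz, hP, hy⟩

-- the k-th standard basis vector of length n
def eN (n k : Nat) : List Int := (List.range n).map (fun j => if k = j then 1 else 0)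

lemma eN_zero (n : Nat) : eN (n + 1) 0 = 1 :: List.replicate n 0 := by
  simp [eN, List.range_succ_eq_map, List.map_map, Function.comp_def, List.map_const']

lemma eN_succ (n k : Nat) : eN (n + 1) (k + 1) = 0 :: eN n k := by
  simp [eN, List.range_succ_eq_map, List.map_map, Function.comp_def]

lemma count_one_eN : ∀ (n k : Nat), k < n → (eN n k).count 1 = 1 := by
  intro n
  induction n with
  | zero => omega
  | succ n ih =>
    intro k hk
    cases k with
    | zero => simp [eN_zero, List.count_replicate]
    | succ k => simpa [eN_succ, List.count_cons] using ih k (by omega)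

lemma count_zero_eN : ∀ (n k : Nat), k < n → (eN n k).count 0 = n - 1 := by
  intro n
  induction n with
  | zero => omega
  | succ n ih =>
    intro k hk
    cases k with
    | zero => simp [eN_zero, List.count_replicate]
    | succ k =>
      have := ih k (by omega)
      have hk' : k < n := by omega
      simp only [eN_succ, List.count_cons]
      simp [this]
      omega

lemma index?_eN : ∀ (n k : Nat), k < n → PySem.List.index? (eN n k) 1 = some k := by
  intro n
  induction n with
  | zero => omega
  | succ n ih =>
    intro k hk
    cases k with
    | zero => rw [eN_zero]; exact PySem.List.index?_cons_self _ _
    | succ k =>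
      rw [eN_succ, PySem.List.index?_cons_of_ne _ (by decide), ih k (by omega)]
      rfl

lemma cnt01_le (xs : List Int) : xs.count 0 + xs.count 1 ≤ xs.length := by
  induction xs with
  | nil => simp
  | cons x xs ih =>
    by_cases h0 : x = 0 <;> by_cases h1 : x = 1 <;>
      simp [h0, h1] <;> omega

-- a column with exactly one 1 and zeros elsewhere, whose first 1 sits at k, IS eN
lemma basis_char_fwd : ∀ (c : List Int) (k : Nat),
    c.count 1 = 1 → c.count 0 = c.length - 1 → PySem.List.index? c 1 = some k →
    c = eN c.length k := by
  intro c
  induction c with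
  | nil => intro k h1 _ _; simp at h1
  | cons x xs ih =>
    intro k h1 h0 hidx
    by_cases hx1 : x = 1
    · subst hx1
      rw [PySem.List.index?_cons_self] at hidx
      injection hidx with hk
      subst hk
      have h0' : xs.count 0 = xs.length := by
        simp at h0
        omega
      have : xs = List.replicate xs.length 0 := by
        have hall := List.count_eq_length.mp h0'
        exact List.eq_replicate_of_mem (fun b hb => (hall b hb).symm)
      calc (1 : Int) :: xs = 1 :: List.replicate xs.length 0 := by rw [← this]
        _ = eN (xs.length + 1) 0 := (eN_zero _).symm
        _ = eN ((1 :: xs).length) 0 := by simp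
    · by_cases hx0 : x = 0
      · subst hx0
        have h1' : xs.count 1 = 1 := by simpa [List.count_cons, hx1] using h1
        have hne : xs ≠ [] := by
          intro h; rw [h] at h1'; simp at h1'
        have h0' : xs.count 0 = xs.length - 1 := by
          have hle := List.count_le_length (l := xs) (a := (0 : Int))
          have hlen : 0 < xs.length := List.length_pos_iff.mpr hne
          simp at h0
          omega
        rw [PySem.List.index?_cons_of_ne _ (by decide)] at hidx
        rcases Option.map_eq_some_iff.mp hidx with ⟨k', hk', rfl⟩
        have := ih k' h1' h0' hk'
        calc (0 : Int) :: xs = 0 :: eN xs.length k' := by rw [← this]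
          _ = eN (xs.length + 1) (k' + 1) := (eN_succ _ _).symm
          _ = eN ((0 :: xs).length) (k' + 1) := by simp
      · exfalso
        have hle := cnt01_le xs
        have h1' : xs.count 1 = 1 := by simpa [List.count_cons, hx1] using h1
        have h0' : xs.count 0 = xs.length := by
          simp [hx0] at h0
          omega
        omega

-- bridge: the ports' Int-indexed basis vector is eN
lemma e_cast (n k : Nat) :
    (PySem.List.pyRange 0 (n : Int) 1).map
        (fun j => if ((k : Nat) : Int) == j then (1 : Int) else 0) = eN n k := by
  rw [PySem.List.pyRange_zero_natCast]
  simp only [List.map_map, Function.comp_def, eN]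
  apply List.map_congr_left
  intro j _
  by_cases h : k = j <;> simp [h]

-- the pointwise fact: a length-n column equals eN n k  iff  B's counting test accepts it with index k
lemma col_char (n k : Nat) (hk : k < n) (c : List Int) (hlen : c.length = n) :
    (((c.count 1 : Int) = 1 ∧ (c.count 0 : Int) = (n : Int) - 1) ∧
        (((PySem.List.index? c 1).getD 0 : Nat) : Int) = ((k : Nat) : Int))
      ↔ c = eN n k := by
  constructor
  · rintro ⟨⟨h1, h0⟩, hidx⟩
    have h1' : c.count 1 = 1 := by exact_mod_cast h1
    have hle := List.count_le_length (l := c) (a := (0 : Int))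
    have h0' : c.count 0 = c.length - 1 := by omega
    have hmem : (1 : Int) ∈ c := List.count_pos_iff.mp (by omega)
    have hsome : (PySem.List.index? c 1).isSome = true :=
      (PySem.List.index?_isSome_iff c 1).mpr hmem
    rcases Option.isSome_iff_exists.mp hsome with ⟨k0, hk0⟩
    have hkk : k0 = k := by
      rw [hk0] at hidx
      exact_mod_cast hidx
    rw [← hlen]
    exact basis_char_fwd c k h1' h0' (hkk ▸ hk0)
  · rintro rfl
    have hn1 : 1 ≤ n := by omega
    refine ⟨⟨by exact_mod_cast count_one_eN n k hk, ?_⟩, ?_⟩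
    · have := count_zero_eN n k hk
      push_cast [this]
      omega
    · rw [index?_eN n k hk]
      rfl

-- ===== VERDICT (by name: the statement is the Claim_ definition above) =====
theorem init_basis_spec : Claim_equal_init_basis := by
  intro A _ _
  unfold Spec_init_basis init_basis init_basis_alt
  simp only [PySem.List.foldl_append_singleton_eq_map, List.nil_append]
  rw [foldl_pair_append_ite (fun b => b ∈
        (PySem.List.pyRange 0 ((A.headD []).length : Int) 1).map (fun j =>
          (PySem.List.pyRange 0 (A.length : Int) 1).map (fun i =>
            PySem.List.pyGetD (PySem.List.pyGetD A i []) j 0)))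
      (fun i => (PySem.List.pyRange 0 (A.length : Int) 1).map
        (fun j => if i == j then (1 : Int) else 0))]
  rw [List.nil_append]
  congr 1
  apply List.filter_congr
  intro i hi
  rcases (PySem.List.mem_pyRange_one).mp hi with ⟨hi0, hin⟩
  set n := A.length with hn
  set m := (A.headD []).length with hm
  have hkn : i.toNat < n := by omega
  have hicast : ((i.toNat : Nat) : Int) = i := Int.toNat_of_nonneg hi0
  have hec : (PySem.List.pyRange 0 (n : Int) 1).map (fun j => if i == j then (1 : Int) else 0)
      = eN n i.toNat := by
    have h := e_cast n i.toNat
    rw [hicast] at h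
    exact h
  have key :
      ((PySem.List.pyRange 0 (n : Int) 1).map (fun j => if i == j then (1 : Int) else 0) ∈
        (PySem.List.pyRange 0 (m : Int) 1).map (fun j =>
          (PySem.List.pyRange 0 (n : Int) 1).map (fun i' =>
            PySem.List.pyGetD (PySem.List.pyGetD A i' []) j 0)))
        ↔ i ∈ ((PySem.List.pyRange 0 (m : Int) 1).foldl
          (fun s j =>
            let col : List Int := (PySem.List.pyRange 0 (n : Int) 1).map (fun i' =>
              PySem.List.pyGetD (PySem.List.pyGetD A i' []) j 0)
            if (PySem.List.count col 1 : Int) = 1 ∧ (PySem.List.count col 0 : Int) = (n : Int) - 1 then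
              PySem.Set.add s (((PySem.List.index? col 1).getD 0 : Nat) : Int)
            else s)
          PySem.Set.empty) := by
    rw [mem_foldl_add_ite
        (fun j => (PySem.List.count ((PySem.List.pyRange 0 (n : Int) 1).map (fun i' =>
            PySem.List.pyGetD (PySem.List.pyGetD A i' []) j 0)) 1 : Int) = 1 ∧
          (PySem.List.count ((PySem.List.pyRange 0 (n : Int) 1).map (fun i' =>
            PySem.List.pyGetD (PySem.List.pyGetD A i' []) j 0)) 0 : Int) = (n : Int) - 1)
        (fun j => (((PySem.List.index? ((PySem.List.pyRange 0 (n : Int) 1).map (fun i' =>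
            PySem.List.pyGetD (PySem.List.pyGetD A i' []) j 0)) 1).getD 0 : Nat) : Int))]
    simp only [PySem.Set.empty, List.not_mem_nil, false_or, List.mem_map]
    constructor
    · rintro ⟨j, hj, hcol⟩
      refine ⟨j, hj, ?_⟩
      have hlen : ((PySem.List.pyRange 0 (n : Int) 1).map (fun i' =>
          PySem.List.pyGetD (PySem.List.pyGetD A i' []) j 0)).length = n := by
        simp [PySem.List.length_pyRange_one]
      have := (col_char n i.toNat hkn _ hlen).mpr (by rw [hcol]; exact hec)
      exact ⟨this.1, by rw [this.2, hicast]⟩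
    · rintro ⟨j, hj, hP, hidx⟩
      refine ⟨j, hj, ?_⟩
      have hlen : ((PySem.List.pyRange 0 (n : Int) 1).map (fun i' =>
          PySem.List.pyGetD (PySem.List.pyGetD A i' []) j 0)).length = n := by
        simp [PySem.List.length_pyRange_one]
      have := (col_char n i.toNat hkn _ hlen).mp ⟨hP, by rw [← hidx, hicast]⟩
      rw [this]
      exact hec.symm
  simp only [PySem.Set.contains_eq_listContains, List.contains_eq_mem, decide_not, key]
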